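-- pv_equiv track=rewrite | github.com/bradlygoodner/jade-infra | hooks/baserow-sync/sync.py | format_log_block
-- ===== SOURCE A (Python) =====
-- LOG_SECTIONS = [
--     ("Tasks", "task"),
--     ("Bugs", "bug"),
--     ("Files changed", "file"),
--     ("Decisions", "decision"),
--     ("Built", "built"),
--     ("Notes", "note"),
-- ]
--
-- def format_log_block(log_lines: list, session_id: str, date_str: str) -> str:
--     """Format pending session-log lines into a row-7 compatible block."""
--     entries = []
--     for line in log_lines:
--         parts = line.split("|", 2)
--         if len(parts) == 3:
--             entries.append((parts[1].strip(), parts[2].strip()))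
--
--     header = f"{date_str} | Claude Code (VPS) | session-{session_id}"
--     sections = []
--     for label, cat in LOG_SECTIONS:
--         items = [text for (c, text) in entries if c == cat]
--         if cat == "file":
--             items = list(dict.fromkeys(items))  # dedup, preserve order
--         if items:
--             bullets = "\n".join(f"- {i}" for i in items)
--             sections.append(f"{label}:\n{bullets}")
--
--     return header + "\n" + "\n".join(sections)
-- ===== SOURCE B (Python) =====
-- def format_log_block(log_lines: list, session_id: str, date_str: str) -> str:
--     """Format pending session-log lines into a row-7 compatible block."""
--     tasks, bugs, files, decisions, built, notes = [], [], [], [], [], []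
--     for line in log_lines:
--         parts = line.split("|", 2)
--         if len(parts) != 3:
--             continue
--         cat = parts[1].strip()
--         text = parts[2].strip()
--         if cat == "task":
--             tasks.append(text)
--         elif cat == "bug":
--             bugs.append(text)
--         elif cat == "file":
--             if text not in files:   # dedup online, first occurrence wins
--                 files.append(text)
--         elif cat == "decision":
--             decisions.append(text)
--         elif cat == "built":
--             built.append(text)
--         elif cat == "note":
--             notes.append(text)
--     sections = [label + ":\n" + "\n".join("- " + t for t in items)
--                 for label, items in (("Tasks", tasks), ("Bugs", bugs),
--                                      ("Files changed", files), ("Decisions", decisions),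
--                                      ("Built", built), ("Notes", notes))
--                 if items]
--     return date_str + " | Claude Code (VPS) | session-" + session_id + "\n" + "\n".join(sections)
-- ===== Notes on version B (the rewrite author's own statement) =====
-- stated objective: alternative
-- what changed: B keeps six explicit per-category bucket lists filled in a single dispatch pass (with the file dedup done online by a membership test at insertion) and then renders the sections by one comprehension over a literal label/bucket table, instead of A's entries list rescanned and filtered once per section with a post-hoc dict.fromkeys dedup.
import Mathlib
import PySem

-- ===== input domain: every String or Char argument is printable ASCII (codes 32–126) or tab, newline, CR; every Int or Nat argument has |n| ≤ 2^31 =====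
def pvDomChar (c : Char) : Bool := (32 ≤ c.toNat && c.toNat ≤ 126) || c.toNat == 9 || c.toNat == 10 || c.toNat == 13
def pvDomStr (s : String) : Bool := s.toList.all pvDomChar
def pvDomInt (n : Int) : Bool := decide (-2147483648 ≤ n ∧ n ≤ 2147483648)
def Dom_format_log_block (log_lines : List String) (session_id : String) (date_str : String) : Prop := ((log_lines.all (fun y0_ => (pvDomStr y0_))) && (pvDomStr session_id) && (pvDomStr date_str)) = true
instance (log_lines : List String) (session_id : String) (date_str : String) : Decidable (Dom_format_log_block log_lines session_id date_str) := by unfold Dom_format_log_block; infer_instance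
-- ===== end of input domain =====

-- B fills six explicit per-category buckets in one dispatch pass (file dedup done online by a membership test) and renders sections from a literal label/bucket table, instead of A's per-section rescans of the entries list (objective: alternative).


-- ===== PORT A =====
def pvLogSections : List (String × String) :=
  [("Tasks", "task"), ("Bugs", "bug"), ("Files changed", "file"),
   ("Decisions", "decision"), ("Built", "built"), ("Notes", "note")]

def format_log_block (log_lines : List String) (session_id : String) (date_str : String) : String :=
  let entries : List (String × String) := log_lines.foldl (fun entries line =>
    -- line.split("|", 2): sep "|" ≠ "" so splitMax? never returns none; getD [] is unreachable
    let parts := (PySem.Str.splitMax? line "|" 2).getD []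
    if parts.length = 3 then
      entries ++ [(PySem.Str.strip (parts.getD 1 ""), PySem.Str.strip (parts.getD 2 ""))]
    else entries) []
  let header := date_str ++ " | Claude Code (VPS) | session-" ++ session_id
  let sections : List String := pvLogSections.foldl (fun sections lc =>
    let items := (entries.filter (fun e => e.1 == lc.2)).map (fun e => e.2)
    let items := if lc.2 == "file" then PySem.List.dedup items else items
    if items.isEmpty then sections
    else sections ++ [lc.1 ++ ":\n" ++ PySem.Str.join "\n" (items.map (fun i => "- " ++ i))]) []
  header ++ "\n" ++ PySem.Str.join "\n" sections

-- ===== PORT B =====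
-- six explicit buckets, one per known category (= Source B's six local lists)
structure PvBuckets where
  tasks : List String
  bugs : List String
  files : List String
  decisions : List String
  built : List String
  notes : List String
deriving Repr, DecidableEq

def format_log_block_alt (log_lines : List String) (session_id : String) (date_str : String) : String :=
  let s : PvBuckets := log_lines.foldl (fun s line =>
    let parts := (PySem.Str.splitMax? line "|" 2).getD []
    if parts.length ≠ 3 then s
    else
      let cat := PySem.Str.strip (parts.getD 1 "")
      let text := PySem.Str.strip (parts.getD 2 "")
      if cat == "task" then { s with tasks := s.tasks ++ [text] }
      else if cat == "bug" then { s with bugs := s.bugs ++ [text] }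
      else if cat == "file" then
        (if s.files.contains text then s else { s with files := s.files ++ [text] })
      else if cat == "decision" then { s with decisions := s.decisions ++ [text] }
      else if cat == "built" then { s with built := s.built ++ [text] }
      else if cat == "note" then { s with notes := s.notes ++ [text] }
      else s)
    ⟨[], [], [], [], [], []⟩
  let sections : List String :=
    ([("Tasks", s.tasks), ("Bugs", s.bugs), ("Files changed", s.files),
      ("Decisions", s.decisions), ("Built", s.built), ("Notes", s.notes)]).filterMap
      (fun li => if li.2.isEmpty then none
                 else some (li.1 ++ ":\n" ++ PySem.Str.join "\n" (li.2.map (fun t => "- " ++ t))))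
  date_str ++ " | Claude Code (VPS) | session-" ++ session_id ++ "\n" ++ PySem.Str.join "\n" sections

-- ===== PRECONDITION & SPEC =====
def Spec_format_log_block (log_lines : List String) (session_id : String) (date_str : String) (out : String) : Prop := out = format_log_block_alt log_lines session_id date_str
instance (log_lines : List String) (session_id : String) (date_str : String) (out : String) : Decidable (Spec_format_log_block log_lines session_id date_str out) := by unfold Spec_format_log_block; infer_instance

-- ===== CLAIM =====
def Claim_equal_format_log_block : Prop := ∀ (log_lines : List String) (session_id : String) (date_str : String), Dom_format_log_block log_lines session_id date_str → Spec_format_log_block log_lines session_id date_str (format_log_block log_lines session_id date_str)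

-- ===== LEMMAS AND PROOFS =====

-- A's items of category c from its entries list
def pvItems (c : String) (es : List (String × String)) : List String :=
  (es.filter (fun e => e.1 == c)).map (fun e => e.2)

lemma pvItems_append (c : String) (es : List (String × String)) (p : String × String) :
    pvItems c (es ++ [p]) = pvItems c es ++ (if p.1 = c then [p.2] else []) := by
  by_cases h : p.1 = c <;> simp [pvItems, List.filter_append, h]

-- dedup of a snoc: append the element iff it is new
lemma pv_dedup_snoc (xs : List String) (a : String) :
    PySem.Set.ofList (xs ++ [a]) =
      if a ∈ xs then PySem.Set.ofList xs else PySem.Set.ofList xs ++ [a] := by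
  rw [PySem.Set.ofList_eq_foldl, List.foldl_append]
  simp only [List.foldl_cons, List.foldl_nil, ← PySem.Set.ofList_eq_foldl]
  rw [PySem.Set.add]
  by_cases h : a ∈ xs <;>
    simp [h, PySem.Set.contains, PySem.Set.mem_ofList]

-- Invariant: B's fold over the lines, started from buckets matching A's entries list es,
-- ends matching A's entries fold (file bucket = dedupped file items).
lemma pv_buckets (lines : List String) (es : List (String × String)) (s : PvBuckets)
    (h1 : s.tasks = pvItems "task" es) (h2 : s.bugs = pvItems "bug" es)
    (h3 : s.files = PySem.List.dedup (pvItems "file" es))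
    (h4 : s.decisions = pvItems "decision" es) (h5 : s.built = pvItems "built" es)
    (h6 : s.notes = pvItems "note" es) :
    (lines.foldl (fun s line =>
      let parts := (PySem.Str.splitMax? line "|" 2).getD []
      if parts.length ≠ 3 then s
      else
        let cat := PySem.Str.strip (parts.getD 1 "")
        let text := PySem.Str.strip (parts.getD 2 "")
        if cat == "task" then { s with tasks := s.tasks ++ [text] }
        else if cat == "bug" then { s with bugs := s.bugs ++ [text] }
        else if cat == "file" then
          (if s.files.contains text then s else { s with files := s.files ++ [text] })
        else if cat == "decision" then { s with decisions := s.decisions ++ [text] }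
        else if cat == "built" then { s with built := s.built ++ [text] }
        else if cat == "note" then { s with notes := s.notes ++ [text] }
        else s) s)
    = (fun es => (⟨pvItems "task" es, pvItems "bug" es, PySem.List.dedup (pvItems "file" es),
                   pvItems "decision" es, pvItems "built" es, pvItems "note" es⟩ : PvBuckets))
      (lines.foldl (fun entries line =>
        let parts := (PySem.Str.splitMax? line "|" 2).getD []
        if parts.length = 3 then
          entries ++ [(PySem.Str.strip (parts.getD 1 ""), PySem.Str.strip (parts.getD 2 ""))]
        else entries) es) := by
  induction lines generalizing es s with
  | nil =>
    simp only [List.foldl_nil]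
    cases s
    simp_all
  | cons line rest ih =>
    simp only [List.foldl_cons]
    by_cases hlen : ((PySem.Str.splitMax? line "|" 2).getD []).length = 3
    · simp only [hlen, if_pos, if_neg (by omega : ¬ (3 ≠ 3))]
      -- (grouping step below)
      set cat := PySem.Str.strip (((PySem.Str.splitMax? line "|" 2).getD []).getD 1 "") with hcat
      set text := PySem.Str.strip (((PySem.Str.splitMax? line "|" 2).getD []).getD 2 "") with htext
      have hsnoc : ∀ c, pvItems c (es ++ [(cat, text)]) =
          pvItems c es ++ (if cat = c then [text] else []) := fun c => pvItems_append c es (cat, text)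
      by_cases c1 : cat = "task"
      · apply ih <;> simp [pvItems_append, c1, h1, h2, h3, h4, h5, h6]
      · by_cases c2 : cat = "bug"
        · apply ih <;> simp [pvItems_append, c2, h1, h2, h3, h4, h5, h6]
        · by_cases c3 : cat = "file"
          · apply ih <;>
              simp [pvItems_append, c3, pv_dedup_snoc, apply_ite, h1, h2, h3, h4, h5, h6]
          · by_cases c4 : cat = "decision"
            · apply ih <;> simp [pvItems_append, c4, h1, h2, h3, h4, h5, h6]
            · by_cases c5 : cat = "built"
              · apply ih <;> simp [pvItems_append, c5, h1, h2, h3, h4, h5, h6]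
              · by_cases c6 : cat = "note"
                · apply ih <;> simp [pvItems_append, c6, h1, h2, h3, h4, h5, h6]
                · -- unknown category: A appends an entry no known section matches; B drops it
                  apply ih <;> simp [pvItems_append, c1, c2, c3, c4, c5, c6, h1, h2, h3, h4, h5, h6]
    · -- the line does not split into 3 parts: both folds keep their state
      rw [if_pos hlen, if_neg hlen]
      exact ih es s h1 h2 h3 h4 h5 h6

-- A fold that either skips an element or appends one rendered value is a filterMap.
lemma pv_foldl_filterMap {a b : Type} (P : a → Bool) (f : a → b) (l : List a) (acc : List b) :
    l.foldl (fun acc x => if P x then acc else acc ++ [f x]) acc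
      = acc ++ l.filterMap (fun x => if P x then none else some (f x)) := by
  induction l generalizing acc with
  | nil => simp
  | cons x xs ih => by_cases h : P x <;> simp [h, ih]

-- Rendering: A's per-section foldl over pvLogSections equals B's filterMap over the
-- literal label/items table, when the items come from the same entries list es.
lemma pv_sections (es : List (String × String)) :
    pvLogSections.foldl (fun sections lc =>
      let items := (es.filter (fun e => e.1 == lc.2)).map (fun e => e.2)
      let items := if lc.2 == "file" then PySem.List.dedup items else items
      if items.isEmpty then sections
      else sections ++ [lc.1 ++ ":\n" ++ PySem.Str.join "\n" (items.map (fun i => "- " ++ i))]) []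
    = ([("Tasks", pvItems "task" es), ("Bugs", pvItems "bug" es),
        ("Files changed", PySem.List.dedup (pvItems "file" es)),
        ("Decisions", pvItems "decision" es), ("Built", pvItems "built" es),
        ("Notes", pvItems "note" es)]).filterMap
        (fun li => if li.2.isEmpty then none
                   else some (li.1 ++ ":\n" ++ PySem.Str.join "\n" (li.2.map (fun t => "- " ++ t)))) := by
  refine Eq.trans (pv_foldl_filterMap
    (fun lc => (if lc.2 == "file"
        then PySem.List.dedup ((es.filter (fun e => e.1 == lc.2)).map (fun e => e.2))
        else (es.filter (fun e => e.1 == lc.2)).map (fun e => e.2)).isEmpty)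
    (fun lc => lc.1 ++ ":\n" ++ PySem.Str.join "\n"
        (((if lc.2 == "file"
            then PySem.List.dedup ((es.filter (fun e => e.1 == lc.2)).map (fun e => e.2))
            else (es.filter (fun e => e.1 == lc.2)).map (fun e => e.2))).map (fun i => "- " ++ i)))
    pvLogSections []) ?_
  simp only [pvLogSections, List.filterMap_cons, List.nil_append, pvItems]
  rfl

-- ===== VERDICT =====
theorem format_log_block_spec : Claim_equal_format_log_block := by
  unfold Claim_equal_format_log_block Spec_format_log_block
  intro ls sid ds _
  simp only [format_log_block, format_log_block_alt]
  rw [pv_buckets ls [] ⟨[], [], [], [], [], []⟩ (by rfl) (by rfl) (by rfl) (by rfl) (by rfl) (by rfl),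
    pv_sections]
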